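-- pv_equiv track=rewrite | github.com/Doxyvan/EugeneHomework | lab2NoRecursion.py | set_up_piece
-- ===== SOURCE A (Python) =====
-- def set_up_piece(wmatrix: list, pos: int, n: int,  piece = "#") -> list:
--     if pos is not None:
--         row = (pos//n)
--         col = (pos%n)
--         wmatrix[row][col] = piece
--         for i in range(5):
--             if i%2==0:
--                 for m in range(-1,2,2):
--                     if n>row+(i-2) >= 0 and n>col+m>=0:
--                         wmatrix[row+(i-2)][col+m] = "*"
--             else:
--                 for m in range(-2,3):
--                     if n>row+(i-2) >= 0 and n>col+m>=0:
--                         wmatrix[row+(i-2)][col+m] = "*"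
--         return wmatrix
-- ===== SOURCE B (Python) =====
-- def set_up_piece(wmatrix: list, pos: int, n: int, piece="#") -> list:
--     if pos is None:
--         return None
--     row, col = pos // n, pos % n
--     result = [rowlist[:] for rowlist in wmatrix]
--     result[row][col] = piece
--
--     def marked(r, c):
--         dr, dc = r - row, c - col
--         return 0 <= r < n and 0 <= c < n and -2 <= dr <= 2 and -2 <= dc <= 2 \
--             and (dr % 2 != 0 or abs(dc) == 1)
--
--     return [["*" if marked(r, c) else v for c, v in enumerate(rowlist)]
--             for r, rowlist in enumerate(result)]
-- ===== Notes on version B (the rewrite author's own statement) =====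
-- stated objective: alternative
-- what changed: Instead of A's five-iteration parity-branching nested loops writing 16 neighbour offsets in place, B copies the matrix, places the piece with one assignment, and rebuilds the matrix in a single cellwise comprehension where each cell decides from its displacement (dr,dc) to the piece whether it becomes '*' (|dr|<=2, |dc|<=2, dr odd or |dc|=1, inside the n x n board) or stays; B returns a fresh list and leaves wmatrix unmodified.
import Mathlib
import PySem

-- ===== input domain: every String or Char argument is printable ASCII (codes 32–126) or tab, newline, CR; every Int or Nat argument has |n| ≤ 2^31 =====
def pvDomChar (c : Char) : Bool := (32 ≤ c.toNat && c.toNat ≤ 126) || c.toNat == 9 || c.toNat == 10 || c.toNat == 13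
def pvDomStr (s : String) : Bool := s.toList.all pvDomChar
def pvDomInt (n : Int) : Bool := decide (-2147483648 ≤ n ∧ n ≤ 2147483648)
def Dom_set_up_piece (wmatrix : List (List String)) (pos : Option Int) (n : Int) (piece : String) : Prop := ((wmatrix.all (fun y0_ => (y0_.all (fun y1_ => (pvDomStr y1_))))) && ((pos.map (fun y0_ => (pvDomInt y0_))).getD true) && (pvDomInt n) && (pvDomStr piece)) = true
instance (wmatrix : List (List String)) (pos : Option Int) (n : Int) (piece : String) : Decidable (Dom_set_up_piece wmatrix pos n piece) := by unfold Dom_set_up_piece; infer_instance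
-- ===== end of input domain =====

-- B copies the matrix, places the piece with one assignment, then rebuilds the matrix in one
-- cellwise pass (each cell decides from its displacement to the piece whether it is marked),
-- instead of A's in-place nested offset-loop writes; A mutates wmatrix in place, B returns a fresh
-- list — the equivalence proved here is about the RETURN value only.

-- ===== PORT A =====
-- wmatrix[r][c] = v  (none where Python raises IndexError)
def pvSetCell (m : List (List String)) (r c : Int) (v : String) : Option (List (List String)) :=
  (PySem.List.pyGet? m r).bind (fun rowList =>
    (PySem.List.pySet? rowList c v).bind (fun rowList' =>
      PySem.List.pySet? m r rowList'))

def set_up_piece (wmatrix : List (List String)) (pos : Option Int) (n : Int) (piece : String) : Option (List (List String)) :=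
  match pos with
  | none => none
  | some p =>
    match PySem.Int.floordiv? p n with
    | none => none
    | some row =>
      match PySem.Int.mod? p n with
      | none => none
      | some col =>
        (pvSetCell wmatrix row col piece).bind (fun m0 =>
          (PySem.List.pyRange 0 5 1).foldl (fun acc i =>
            if PySem.Int.mod i 2 = 0 then
              (PySem.List.pyRange (-1) 2 2).foldl (fun acc2 m =>
                acc2.bind (fun mm =>
                  if (row + (i - 2) < n ∧ 0 ≤ row + (i - 2)) ∧ (col + m < n ∧ 0 ≤ col + m) then
                    pvSetCell mm (row + (i - 2)) (col + m) "*"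
                  else some mm)) acc
            else
              (PySem.List.pyRange (-2) 3 1).foldl (fun acc2 m =>
                acc2.bind (fun mm =>
                  if (row + (i - 2) < n ∧ 0 ≤ row + (i - 2)) ∧ (col + m < n ∧ 0 ≤ col + m) then
                    pvSetCell mm (row + (i - 2)) (col + m) "*"
                  else some mm)) acc) (some m0))

-- ===== PORT B =====
-- marked(r, c) of Source B: is cell (r, c) a marked neighbour of the piece at (row, col)?
abbrev pvMarked (row col n : Int) (r c : Int) : Prop :=
  (0 ≤ r ∧ r < n) ∧ (0 ≤ c ∧ c < n) ∧
  (-2 ≤ r - row ∧ r - row ≤ 2) ∧ (-2 ≤ c - col ∧ c - col ≤ 2) ∧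
  (PySem.Int.mod (r - row) 2 ≠ 0 ∨ (c - col).natAbs = 1)

def set_up_piece_alt (wmatrix : List (List String)) (pos : Option Int) (n : Int) (piece : String) : Option (List (List String)) :=
  match pos with
  | none => none
  | some p =>
    match PySem.Int.floordiv? p n, PySem.Int.mod? p n with
    | some row, some col =>
      -- result = [rowlist[:] for rowlist in wmatrix]; result[row][col] = piece
      (pvSetCell (wmatrix.map (fun rowlist => PySem.List.slice rowlist none none)) row col piece).bind
        (fun result =>
          some ((PySem.List.enumerate result 0).map (fun rp =>
            (PySem.List.enumerate rp.2 0).map (fun cp =>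
              if pvMarked row col n rp.1 cp.1 then "*" else cp.2))))
    | _, _ => none

-- ===== PRECONDITION & SPEC =====
-- the sixteen neighbourhood displacements A's loops enumerate
def pvOffList : List (Int × Int) :=
  [(-2, -1), (-2, 1),
   (-1, -2), (-1, -1), (-1, 0), (-1, 1), (-1, 2),
   (0, -1), (0, 1),
   (1, -2), (1, -1), (1, 0), (1, 1), (1, 2),
   (2, -1), (2, 1)]

-- Pre_ is exactly the inputs on which the Python A returns normally: n ≠ 0 (else ZeroDivisionError)
-- and every cell A writes — the unguarded piece cell under Python index semantics (negative index
-- wraps), and each board-guarded mark cell — lies inside the actual (possibly ragged) matrix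
-- (else IndexError).
def Pre_set_up_piece (wmatrix : List (List String)) (pos : Option Int) (n : Int) (piece : String) : Prop :=
  ∀ p ∈ pos.toList,
    n ≠ 0 ∧
    (((PySem.List.pyGet? wmatrix (PySem.Int.floordiv p n)).bind
        (fun row => PySem.List.pyGet? row (PySem.Int.mod p n))).isSome = true) ∧
    ∀ q ∈ pvOffList,
      (0 ≤ PySem.Int.floordiv p n + q.1 ∧ PySem.Int.floordiv p n + q.1 < n ∧
       0 ≤ PySem.Int.mod p n + q.2 ∧ PySem.Int.mod p n + q.2 < n) →
      (((PySem.List.pyGet? wmatrix (PySem.Int.floordiv p n + q.1)).bind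
          (fun row => PySem.List.pyGet? row (PySem.Int.mod p n + q.2))).isSome = true)

instance (wmatrix : List (List String)) (pos : Option Int) (n : Int) (piece : String) : Decidable (Pre_set_up_piece wmatrix pos n piece) := by
  unfold Pre_set_up_piece; infer_instance

def pvWitness_set_up_piece : List (List String) × Option Int × Int × String :=
  ([["a", "b"], ["c", "d"]], some 1, 2, "#")

def Spec_set_up_piece (wmatrix : List (List String)) (pos : Option Int) (n : Int) (piece : String) (out : Option (List (List String))) : Prop := out = set_up_piece_alt wmatrix pos n piece
instance (wmatrix : List (List String)) (pos : Option Int) (n : Int) (piece : String) (out : Option (List (List String))) : Decidable (Spec_set_up_piece wmatrix pos n piece out) := by unfold Spec_set_up_piece; infer_instance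

-- ===== CLAIM (what is proved, stated in full; the proofs are below) =====
def Claim_equal_set_up_piece : Prop := ∀ (wmatrix : List (List String)) (pos : Option Int) (n : Int) (piece : String), Dom_set_up_piece wmatrix pos n piece → Pre_set_up_piece wmatrix pos n piece → Spec_set_up_piece wmatrix pos n piece (set_up_piece wmatrix pos n piece)

-- ===== LEMMAS AND PROOFS =====

-- the cell wmatrix[i][j] (Nat indices), none when out of bounds
def pvCell? (m : List (List String)) (i j : Nat) : Option String :=
  m[i]?.bind (fun r => r[j]?)

-- pure Nat-indexed cell update
def pvUpd (m : List (List String)) (r c : Nat) (v : String) : List (List String) :=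
  m.modify r (fun row => row.set c v)

-- A's mark guard for a displacement q (in A's literal order)
abbrev pvG (n R C : Int) (q : Int × Int) : Prop :=
  (R + q.1 < n ∧ 0 ≤ R + q.1) ∧ (C + q.2 < n ∧ 0 ≤ C + q.2)

def pvStepO (n R C : Int) (acc : Option (List (List String))) (q : Int × Int) : Option (List (List String)) :=
  acc.bind (fun m => if pvG n R C q then pvSetCell m (R + q.1) (C + q.2) "*" else some m)

def pvStepP (n R C : Int) (m : List (List String)) (q : Int × Int) : List (List String) :=
  if pvG n R C q then pvUpd m (R + q.1).toNat (C + q.2).toNat "*" else m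

theorem pvCell?_upd (m : List (List String)) (r c : Nat) (v : String) (i j : Nat) :
    pvCell? (pvUpd m r c v) i j =
      if r = i ∧ c = j ∧ (pvCell? m i j).isSome = true then some v else pvCell? m i j := by
  unfold pvCell? pvUpd
  rw [List.getElem?_modify]
  cases hm : m[i]? with
  | none => simp
  | some row =>
    by_cases hr : r = i
    · subst hr
      simp only [Option.bind_some]
      by_cases hc : c = j
      · subst hc
        by_cases hlt : c < row.length
        · simp [hlt]
        · simp [hlt]
      · simp [hc]
    · simp [hr]

theorem pvCell?_upd_isSome (m : List (List String)) (r c : Nat) (v : String) (i j : Nat) :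
    (pvCell? (pvUpd m r c v) i j).isSome = (pvCell? m i j).isSome := by
  rw [pvCell?_upd]; split_ifs with h
  · simp [h.2.2]
  · rfl

theorem pvSetCell_some (m : List (List String)) (r c : Int) (v : String)
    (hr : 0 ≤ r) (hc : 0 ≤ c) (h : (pvCell? m r.toNat c.toNat).isSome = true) :
    pvSetCell m r c v = some (pvUpd m r.toNat c.toNat v) := by
  unfold pvCell? at h
  cases hm : m[r.toNat]? with
  | none => rw [hm] at h; simp at h
  | some row =>
    rw [hm] at h
    simp only [Option.bind_some] at h
    have hrow : r.toNat < m.length := (List.getElem?_eq_some_iff.mp hm).1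
    have hcol : c.toNat < row.length := by
      cases hj : row[c.toNat]? with
      | none => rw [hj] at h; simp at h
      | some x => exact (List.getElem?_eq_some_iff.mp hj).1
    have hrv : m[r.toNat] = row := by
      have := List.getElem?_eq_some_iff.mp hm; exact this.2
    have hget : PySem.List.pyGet? m r = some row := by
      have h1 := PySem.List.pyGet?_natCast m r.toNat
      rw [Int.toNat_of_nonneg hr] at h1
      rw [h1, hm]
    have hset1 : PySem.List.pySet? row c v = some (row.set c.toNat v) := by
      have h1 := PySem.List.pySet?_natCast row c.toNat v hcol
      rw [Int.toNat_of_nonneg hc] at h1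
      exact h1
    have hset2 : PySem.List.pySet? m r (row.set c.toNat v) = some (m.set r.toNat (row.set c.toNat v)) := by
      have h1 := PySem.List.pySet?_natCast m r.toNat (row.set c.toNat v) hrow
      rw [Int.toNat_of_nonneg hr] at h1
      exact h1
    unfold pvSetCell
    simp only [hget, Option.bind_some, hset1, hset2]
    unfold pvUpd
    rw [List.modify_eq_set_get _ hrow]
    simp [List.get_eq_getElem, hrv]

theorem pvStepP_isSome (n R C : Int) (q : Int × Int) (m : List (List String)) (i j : Nat) :
    (pvCell? (pvStepP n R C m q) i j).isSome = (pvCell? m i j).isSome := by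
  unfold pvStepP; split_ifs with h
  · exact pvCell?_upd_isSome _ _ _ _ _ _
  · rfl

theorem pvFoldP_isSome (n R C : Int) (L : List (Int × Int)) (i j : Nat) :
    ∀ m, (pvCell? (L.foldl (pvStepP n R C) m) i j).isSome = (pvCell? m i j).isSome := by
  induction L with
  | nil => intro m; rfl
  | cons q L ih => intro m; rw [List.foldl_cons, ih, pvStepP_isSome]

theorem pvFoldO_eq (wm : List (List String)) (n R C : Int) (L : List (Int × Int))
    (hL : ∀ q ∈ L, pvG n R C q → (pvCell? wm (R + q.1).toNat (C + q.2).toNat).isSome = true) :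
    ∀ m, (∀ i j, (pvCell? m i j).isSome = (pvCell? wm i j).isSome) →
      L.foldl (pvStepO n R C) (some m) = some (L.foldl (pvStepP n R C) m) := by
  induction L with
  | nil => intro m _; rfl
  | cons q L ih =>
    intro m hinv
    have hstep : pvStepO n R C (some m) q = some (pvStepP n R C m q) := by
      unfold pvStepO pvStepP
      rw [Option.bind_some]
      split_ifs with hg
      · exact pvSetCell_some m _ _ _ hg.1.2 hg.2.2
          (by rw [hinv]; exact hL q (List.mem_cons_self) hg)
      · rfl
    rw [List.foldl_cons, hstep, List.foldl_cons,
      ih (fun q hq => hL q (List.mem_cons_of_mem _ hq))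
        (pvStepP n R C m q) (fun i j => by rw [pvStepP_isSome, hinv])]

theorem pvFoldP_cell (n R C : Int) (L : List (Int × Int)) (i j : Nat) :
    ∀ m, (pvCell? m i j).isSome = true →
      pvCell? (L.foldl (pvStepP n R C) m) i j =
        if ∃ q ∈ L, pvG n R C q ∧ R + q.1 = (i : Int) ∧ C + q.2 = (j : Int) then some "*"
        else pvCell? m i j := by
  induction L with
  | nil => intro m _; simp
  | cons q L ih =>
    intro m hs
    rw [List.foldl_cons, ih _ (by rw [pvStepP_isSome]; exact hs)]
    by_cases hq : pvG n R C q ∧ R + q.1 = (i : Int) ∧ C + q.2 = (j : Int)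
    · obtain ⟨hg, he1, he2⟩ := hq
      have hg' := hg
      unfold pvG at hg'
      have hcell : pvCell? (pvStepP n R C m q) i j = some "*" := by
        unfold pvStepP
        rw [if_pos hg, pvCell?_upd, if_pos]
        exact ⟨by omega, by omega, hs⟩
      rw [hcell]
      have : ∃ q' ∈ q :: L, pvG n R C q' ∧ R + q'.1 = (i : Int) ∧ C + q'.2 = (j : Int) :=
        ⟨q, List.mem_cons_self, hg, he1, he2⟩
      rw [if_pos this]; split_ifs <;> rfl
    · have hcell : pvCell? (pvStepP n R C m q) i j = pvCell? m i j := by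
        unfold pvStepP
        split_ifs with hg
        · have hg' := hg
          unfold pvG at hg'
          rw [pvCell?_upd, if_neg]
          intro ⟨h1, h2, _⟩
          exact hq ⟨hg, by omega, by omega⟩
        · rfl
      rw [hcell]
      have hiff : (∃ q' ∈ q :: L, pvG n R C q' ∧ R + q'.1 = (i : Int) ∧ C + q'.2 = (j : Int)) ↔
          (∃ q' ∈ L, pvG n R C q' ∧ R + q'.1 = (i : Int) ∧ C + q'.2 = (j : Int)) := by
        constructor
        · rintro ⟨q', hq', hrest⟩
          rcases List.mem_cons.mp hq' with h | h
          · exact absurd (h ▸ hrest) hq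
          · exact ⟨q', h, hrest⟩
        · rintro ⟨q', hq', hrest⟩
          exact ⟨q', List.mem_cons_of_mem _ hq', hrest⟩
      simp only [hiff]

theorem pvLength_foldP (n R C : Int) (L : List (Int × Int)) :
    ∀ m, (L.foldl (pvStepP n R C) m).length = m.length := by
  induction L with
  | nil => intro m; rfl
  | cons q L ih =>
    intro m
    rw [List.foldl_cons, ih]
    unfold pvStepP; split_ifs
    · exact List.length_modify _ _ _
    · rfl

-- Python's wrap-aware cell test of Pre_ coincides with the Nat-indexed one at nonnegative indices
theorem pvOk_eq (m : List (List String)) (r c : Int) (hr : 0 ≤ r) (hc : 0 ≤ c) :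
    ((PySem.List.pyGet? m r).bind (fun row => PySem.List.pyGet? row c)).isSome
      = (pvCell? m r.toNat c.toNat).isSome := by
  have h1 := PySem.List.pyGet?_natCast (α := List String) m r.toNat
  rw [Int.toNat_of_nonneg hr] at h1
  unfold pvCell?
  rw [h1]
  cases m[r.toNat]? with
  | none => rfl
  | some row =>
    simp only [Option.bind_some]
    have h2 := PySem.List.pyGet?_natCast (α := String) row c.toNat
    rw [Int.toNat_of_nonneg hc] at h2
    rw [h2]

-- A's unrolled loop is the guarded fold over pvOffList
theorem pvA_unroll (wm : List (List String)) (p n R C : Int) (piece : String)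
    (hRs : PySem.Int.floordiv? p n = some R) (hCs : PySem.Int.mod? p n = some C) :
    set_up_piece wm (some p) n piece =
      (pvSetCell wm R C piece).bind
        (fun m0 => pvOffList.foldl (pvStepO n R C) (some m0)) := by
  simp only [set_up_piece, hRs, hCs,
    show PySem.List.pyRange 0 5 1 = [0, 1, 2, 3, 4] from by decide,
    show PySem.List.pyRange (-1) 2 2 = [-1, 1] from by decide,
    show PySem.List.pyRange (-2) 3 1 = [-2, -1, 0, 1, 2] from by decide,
    pvOffList, pvStepO, pvG, List.foldl,
    show PySem.Int.mod 0 2 = 0 from by decide,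
    show PySem.Int.mod 1 2 = 1 from by decide,
    show PySem.Int.mod 2 2 = 0 from by decide,
    show PySem.Int.mod 3 2 = 1 from by decide,
    show PySem.Int.mod 4 2 = 0 from by decide]
  norm_num

-- a resolved Python index is in range
theorem pvIdx_lt {nn : Nat} {i : Int} {k : Nat} (h : PySem.List.pyIdx? nn i = some k) : k < nn := by
  unfold PySem.List.pyIdx? at h
  split_ifs at h <;> simp only [Option.some.injEq] at h <;> omega

-- the guarded write of A's piece placement succeeds exactly when Pre_'s cell test holds
theorem pvSetCell_isSome (m : List (List String)) (r c : Int) (v : String)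
    (h : ((PySem.List.pyGet? m r).bind (fun row => PySem.List.pyGet? row c)).isSome = true) :
    (pvSetCell m r c v).isSome = true := by
  unfold pvSetCell
  cases hg : PySem.List.pyGet? m r with
  | none => rw [hg] at h; simp at h
  | some row =>
    rw [hg] at h
    simp only [Option.bind_some] at h ⊢
    have hks : (PySem.List.pyIdx? m.length r).isSome = true := by
      unfold PySem.List.pyGet? at hg
      cases hx : PySem.List.pyIdx? m.length r with
      | none => rw [hx] at hg; simp at hg
      | some k => rfl
    unfold PySem.List.pyGet? at h
    cases hk2 : PySem.List.pyIdx? row.length c with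
    | none => rw [hk2] at h; simp at h
    | some k2 =>
      unfold PySem.List.pySet?
      rw [hk2]
      simp only [Option.map_some, Option.bind_some]
      cases hx : PySem.List.pyIdx? m.length r with
      | none => rw [hx] at hks; simp at hks
      | some k => rfl

-- pvSetCell preserves the shape of the matrix
theorem pvSetCell_shape (m : List (List String)) (r c : Int) (v : String) (m' : List (List String))
    (h : pvSetCell m r c v = some m') :
    m'.length = m.length ∧ ∀ i j, (pvCell? m' i j).isSome = (pvCell? m i j).isSome := by
  unfold pvSetCell at h
  cases hg : PySem.List.pyGet? m r with
  | none => rw [hg] at h; cases h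
  | some row =>
    rw [hg] at h
    simp only [Option.bind_some] at h
    cases hs1 : PySem.List.pySet? row c v with
    | none => rw [hs1] at h; cases h
    | some row' =>
      rw [hs1] at h
      simp only [Option.bind_some] at h
      unfold PySem.List.pySet? at h hs1
      unfold PySem.List.pyGet? at hg
      cases hk : PySem.List.pyIdx? m.length r with
      | none => rw [hk] at h; cases h
      | some k =>
        rw [hk] at h hg
        cases hk2 : PySem.List.pyIdx? row.length c with
        | none => rw [hk2] at hs1; cases hs1
        | some k2 =>
          rw [hk2] at hs1
          simp only [Option.map_some, Option.some.injEq] at h hs1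
          simp only [Option.bind_some] at hg
          subst hs1
          subst h
          have hklt : k < m.length := pvIdx_lt hk
          have hk2lt : k2 < row.length := pvIdx_lt hk2
          refine ⟨by simp, ?_⟩
          intro i j
          unfold pvCell?
          rw [List.getElem?_set]
          by_cases hik : k = i
          · subst hik
            rw [if_pos rfl, if_pos hklt, hg]
            simp only [Option.bind_some, List.getElem?_set]
            by_cases hjk : k2 = j
            · subst hjk
              rw [if_pos rfl, if_pos hk2lt, List.getElem?_eq_getElem hk2lt]
              rfl
            · rw [if_neg hjk]
          · rw [if_neg hik]

-- the per-cell correspondence between A's mark writes and B's marked predicate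
theorem pvCell_correct (R C n : Int) (old : String) (i j : Nat) :
    (if ∃ q ∈ pvOffList, pvG n R C q ∧ R + q.1 = (i : Int) ∧ C + q.2 = (j : Int) then some "*"
     else some old)
    = some (if pvMarked R C n (i : Int) (j : Int) then "*" else old) := by
  have hex : (∃ q ∈ pvOffList, pvG n R C q ∧ R + q.1 = (i : Int) ∧ C + q.2 = (j : Int)) ↔
      ((0 ≤ (i : Int) ∧ (i : Int) < n) ∧ (0 ≤ (j : Int) ∧ (j : Int) < n) ∧
       (-2 ≤ (i : Int) - R ∧ (i : Int) - R ≤ 2) ∧ (-2 ≤ (j : Int) - C ∧ (j : Int) - C ≤ 2) ∧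
       (((i : Int) - R) % 2 ≠ 0 ∨ ((j : Int) - C).natAbs = 1)) := by
    constructor
    · rintro ⟨q, hq, hg, h1, h2⟩
      unfold pvG at hg
      simp only [pvOffList, List.mem_cons, List.not_mem_nil, or_false] at hq
      rcases hq with rfl|rfl|rfl|rfl|rfl|rfl|rfl|rfl|rfl|rfl|rfl|rfl|rfl|rfl|rfl|rfl <;>
        (dsimp only at hg h1 h2; omega)
    · rintro ⟨hi, hj, ⟨hdr1, hdr2⟩, ⟨hdc1, hdc2⟩, hpar⟩
      refine ⟨((i : Int) - R, (j : Int) - C), ?_, ⟨⟨by omega, by omega⟩, by omega, by omega⟩,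
        by omega, by omega⟩
      have h5 : ((i : Int) - R = -2 ∨ (i : Int) - R = -1 ∨ (i : Int) - R = 0 ∨
          (i : Int) - R = 1 ∨ (i : Int) - R = 2) := by omega
      have h6 : ((j : Int) - C = -2 ∨ (j : Int) - C = -1 ∨ (j : Int) - C = 0 ∨
          (j : Int) - C = 1 ∨ (j : Int) - C = 2) := by omega
      rcases h5 with h|h|h|h|h <;> rcases h6 with h'|h'|h'|h'|h' <;>
        first | (exfalso; omega) | (rw [h, h']; decide)
  have hmark : pvMarked R C n (i : Int) (j : Int) ↔
      ((0 ≤ (i : Int) ∧ (i : Int) < n) ∧ (0 ≤ (j : Int) ∧ (j : Int) < n) ∧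
       (-2 ≤ (i : Int) - R ∧ (i : Int) - R ≤ 2) ∧ (-2 ≤ (j : Int) - C ∧ (j : Int) - C ≤ 2) ∧
       (((i : Int) - R) % 2 ≠ 0 ∨ ((j : Int) - C).natAbs = 1)) := by
    unfold pvMarked
    rw [PySem.Int.mod_eq_emod_of_pos (by norm_num : (0:Int) < 2)]
  by_cases hb : (0 ≤ (i : Int) ∧ (i : Int) < n) ∧ (0 ≤ (j : Int) ∧ (j : Int) < n) ∧
      (-2 ≤ (i : Int) - R ∧ (i : Int) - R ≤ 2) ∧ (-2 ≤ (j : Int) - C ∧ (j : Int) - C ≤ 2) ∧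
      (((i : Int) - R) % 2 ≠ 0 ∨ ((j : Int) - C).natAbs = 1)
  · rw [if_pos (hex.mpr hb), if_pos (hmark.mpr hb)]
  · rw [if_neg (fun hx => hb (hex.mp hx)), if_neg (fun hx => hb (hmark.mp hx))]

-- ===== VERDICT (by name: the statement is the Claim_ definition above) =====
theorem set_up_piece_spec : Claim_equal_set_up_piece := by
  intro wmatrix pos n piece _ hpre
  unfold Spec_set_up_piece
  cases pos with
  | none => rfl
  | some p =>
    obtain ⟨hn0, hcenO, hoffO⟩ := hpre p (by simp)
    set R := PySem.Int.floordiv p n with hRdef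
    set C := PySem.Int.mod p n with hCdef
    have hRs : PySem.Int.floordiv? p n = some R := by
      simp [PySem.Int.floordiv?, PySem.Int.floordiv, hn0, hRdef]
    have hCs : PySem.Int.mod? p n = some C := by
      simp [PySem.Int.mod?, PySem.Int.mod, hn0, hCdef]
    have hcopy : wmatrix.map (fun rowlist => PySem.List.slice rowlist none none) = wmatrix := by
      simp [PySem.List.slice_none_none]
    obtain ⟨m0, hm0⟩ := Option.isSome_iff_exists.mp (pvSetCell_isSome wmatrix R C piece hcenO)
    obtain ⟨hlen0, hshape⟩ := pvSetCell_shape wmatrix R C piece m0 hm0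
    rw [pvA_unroll wmatrix p n R C piece hRs hCs, hm0, Option.bind_some,
      pvFoldO_eq wmatrix n R C pvOffList
        (fun q hq hg => by
          rw [← pvOk_eq wmatrix (R + q.1) (C + q.2) hg.1.2 hg.2.2]
          exact hoffO q hq ⟨hg.1.2, hg.1.1, hg.2.2, hg.2.1⟩)
        m0 hshape]
    simp only [set_up_piece_alt, hRs, hCs, hcopy, hm0, Option.bind_some]
    congr 1
    apply List.ext_getElem?
    intro i
    by_cases hi : i < m0.length
    · have hiL : i < (pvOffList.foldl (pvStepP n R C) m0).length := by
        rw [pvLength_foldP]; exact hi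
      rw [List.getElem?_eq_getElem hiL, List.getElem?_map, PySem.List.getElem?_enumerate,
        List.getElem?_eq_getElem hi]
      simp only [Option.map_some]
      congr 1
      apply List.ext_getElem?
      intro j
      have hLrow : (pvOffList.foldl (pvStepP n R C) m0)[i][j]?
          = pvCell? (pvOffList.foldl (pvStepP n R C) m0) i j := by
        unfold pvCell?
        rw [List.getElem?_eq_getElem hiL, Option.bind_some]
      rw [hLrow, List.getElem?_map, PySem.List.getElem?_enumerate]
      by_cases hj : j < m0[i].length
      · have hm0j : pvCell? m0 i j = some m0[i][j] := by
          unfold pvCell?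
          rw [List.getElem?_eq_getElem hi, Option.bind_some, List.getElem?_eq_getElem hj]
        rw [pvFoldP_cell n R C pvOffList i j m0 (by rw [hm0j]; rfl), hm0j,
          List.getElem?_eq_getElem hj]
        simp only [Option.map_some]
        rw [pvCell_correct R C n m0[i][j] i j]
        norm_num
      · have hm0j : pvCell? m0 i j = none := by
          unfold pvCell?
          rw [List.getElem?_eq_getElem hi, Option.bind_some,
            List.getElem?_eq_none (by omega : m0[i].length ≤ j)]
        have hnone : (pvCell? (pvOffList.foldl (pvStepP n R C) m0) i j).isSome = false := by
          rw [pvFoldP_isSome, hm0j]; rfl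
        rw [Option.isSome_eq_false_iff, Option.isNone_iff_eq_none] at hnone
        rw [hnone, List.getElem?_eq_none (by omega : m0[i].length ≤ j)]
        rfl
    · rw [List.getElem?_eq_none, List.getElem?_eq_none]
      · rw [List.length_map, PySem.List.length_enumerate]; omega
      · rw [pvLength_foldP]; omega
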